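-- pv_equiv track=rewrite | github.com/jamesujeon/coding-problem-solutions | programmers/python 3/42862.py | solution
-- ===== SOURCE A (Python) =====
-- def solution(n, lost, reserve):
--     reserve_lost = set(lost).intersection(set(reserve))
--     lost = sorted(set(lost) - reserve_lost)
--     reserve = list(set(reserve) - reserve_lost)
--
--     for p in list(lost):
--         if p - 1 in reserve:
--             reserve.remove(p - 1)
--             lost.remove(p)
--         elif p + 1 in reserve:
--             reserve.remove(p + 1)
--             lost.remove(p)
--     return n - len(lost)
-- ===== SOURCE B (Python) =====
-- def solution(n, lost, reserve):
--     R = set(reserve) - set(lost)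
--     L = sorted(set(lost) - set(reserve))
--     matched = 0
--     used_plus = None  # the largest reserve element already lent via the p+1 branch
--     for p in L:
--         if p - 1 in R and p - 1 != used_plus:
--             matched += 1
--         elif p + 1 in R:
--             matched += 1
--             used_plus = p + 1
--     return n - len(L) + matched
-- ===== Notes on version B (the rewrite author's own statement) =====
-- stated objective: faster
-- what changed: A repeatedly mutates two lists (reserve.remove / lost.remove, plus 'in' tests on a list) inside the loop; B makes one pass over the sorted lost-only students with O(1) extra state (a match counter and the last reserve element lent forward), testing membership in the fixed reserve-only set, and returns n - len(L) + matched.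
import Mathlib
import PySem

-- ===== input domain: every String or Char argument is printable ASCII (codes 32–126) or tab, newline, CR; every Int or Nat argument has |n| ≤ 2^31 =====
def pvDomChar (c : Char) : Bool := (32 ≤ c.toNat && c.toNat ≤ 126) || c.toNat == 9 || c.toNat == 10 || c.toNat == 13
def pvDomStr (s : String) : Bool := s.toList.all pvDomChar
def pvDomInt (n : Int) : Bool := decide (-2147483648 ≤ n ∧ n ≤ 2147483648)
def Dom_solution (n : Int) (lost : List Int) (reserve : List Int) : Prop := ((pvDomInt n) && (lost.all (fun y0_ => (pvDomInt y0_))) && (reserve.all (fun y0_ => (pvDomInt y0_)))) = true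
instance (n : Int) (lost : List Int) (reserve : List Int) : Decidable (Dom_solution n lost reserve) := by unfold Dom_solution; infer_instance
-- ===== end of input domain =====

-- B replaces A's quadratic mutate-two-lists greedy by a single pass over the sorted lost-only
-- students with set membership tests and O(1) extra state (objective: faster, constant-factor).

-- ===== PORT A =====
-- list.remove(x) raises ValueError when x is absent; every call in A is guarded by a
-- membership test (and p is always in the current lost list), so the getD fallback is unreachable.
def pyRemove (l : List Int) (x : Int) : List Int := (PySem.List.remove? l x).getD l

def stepA (s : List Int × List Int) (p : Int) : List Int × List Int :=
  if p - 1 ∈ s.2 then (pyRemove s.1 p, pyRemove s.2 (p - 1))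
  else if p + 1 ∈ s.2 then (pyRemove s.1 p, pyRemove s.2 (p + 1))
  else s

def solution (n : Int) (lost : List Int) (reserve : List Int) : Int :=
  let reserveLost := PySem.Set.inter (PySem.Set.ofList lost) (PySem.Set.ofList reserve)
  let lost1 := PySem.List.sorted (PySem.Set.diff (PySem.Set.ofList lost) reserveLost) (fun x => x) false
  -- list(set(reserve) - reserve_lost): only membership / remove / (via lost) length reach the
  -- result, so the unmodelled set iteration order cannot affect it; the Set's order is used.
  let reserve1 : List Int := PySem.Set.diff (PySem.Set.ofList reserve) reserveLost
  let s := lost1.foldl stepA (lost1, reserve1)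
  n - (s.1.length : Int)

-- ===== PORT B =====
def stepB (R : List Int) (s : Int × Option Int) (p : Int) : Int × Option Int :=
  if p - 1 ∈ R ∧ s.2 ≠ some (p - 1) then (s.1 + 1, s.2)
  else if p + 1 ∈ R then (s.1 + 1, some (p + 1))
  else s

def solution_alt (n : Int) (lost : List Int) (reserve : List Int) : Int :=
  let R : List Int := PySem.Set.diff (PySem.Set.ofList reserve) (PySem.Set.ofList lost)
  let L := PySem.List.sorted (PySem.Set.diff (PySem.Set.ofList lost) (PySem.Set.ofList reserve)) (fun x => x) false
  let s := L.foldl (stepB R) ((0 : Int), (none : Option Int))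
  n - (L.length : Int) + s.1

-- ===== PRECONDITION & SPEC =====
def Spec_solution (n : Int) (lost : List Int) (reserve : List Int) (out : Int) : Prop := out = solution_alt n lost reserve
instance (n : Int) (lost : List Int) (reserve : List Int) (out : Int) : Decidable (Spec_solution n lost reserve out) := by unfold Spec_solution; infer_instance

-- ===== CLAIM (what is proved, stated in full; the proofs are below) =====
def Claim_equal_solution : Prop := ∀ (n : Int) (lost : List Int) (reserve : List Int), Dom_solution n lost reserve → Spec_solution n lost reserve (solution n lost reserve)

-- ===== LEMMAS AND PROOFS =====

-- The heart of the equivalence: along the strictly increasing list of lost-only students,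
-- A's mutable (lost, reserve) state and B's (count, used_plus) state stay in sync.
-- M is the ghost list of reserve elements consumed so far that B's used_plus no longer records.
lemma loop_eq (R : List Int) (ls : List Int) : ∀ (lc rs M : List Int) (u : Option Int) (m : Int),
    ls.Pairwise (· < ·) →
    (∀ q ∈ ls, q ∉ R) →
    (∀ q ∈ ls, q ∈ lc) → lc.Nodup → rs.Nodup →
    (∀ x : Int, x ∈ rs ↔ (x ∈ R ∧ x ∉ M ∧ u ≠ some x)) →
    (∀ y ∈ M, ∀ q ∈ ls, y < q - 1) →
    (∀ v : Int, u = some v → ∀ q ∈ ls, v ≤ q ∧ v ∈ R) →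
    ((ls.foldl stepA (lc, rs)).1.length : Int) + (ls.foldl (stepB R) (m, u)).1
      = (lc.length : Int) + m := by
  induction ls with
  | nil => intro lc rs M u m _ _ _ _ _ _ _ _; simp
  | cons q tl ih =>
    intro lc rs M u m hpw hdisj hsub hlcnd hrsnd hchar hM hu
    have hqlc : q ∈ lc := hsub q (by simp)
    have hlen : (lc.erase q).length = lc.length - 1 := List.length_erase_of_mem hqlc
    have hpos : 0 < lc.length := List.length_pos_of_mem hqlc
    have hqtl : ∀ q' ∈ tl, q < q' := by
      intro q' hq'; exact (List.pairwise_cons.mp hpw).1 q' hq'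
    have hpwtl : tl.Pairwise (· < ·) := (List.pairwise_cons.mp hpw).2
    have hm1 : (q - 1 ∈ rs) ↔ ((q - 1) ∈ R ∧ u ≠ some (q - 1)) := by
      rw [hchar]
      constructor
      · rintro ⟨h1, _, h3⟩; exact ⟨h1, h3⟩
      · rintro ⟨h1, h3⟩
        refine ⟨h1, ?_, h3⟩
        intro hmem
        have := hM _ hmem q (by simp)
        omega
    have hp1 : (q + 1 ∈ rs) ↔ (q + 1) ∈ R := by
      rw [hchar]
      constructor
      · rintro ⟨h1, _, _⟩; exact h1
      · intro h1
        refine ⟨h1, ?_, ?_⟩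
        · intro hmem; have := hM _ hmem q (by simp); omega
        · intro heq
          have := hu _ heq q (by simp)
          omega
    have hsubtl : ∀ q' ∈ tl, q' ∈ lc.erase q := by
      intro q' hq'
      exact hlcnd.mem_erase_iff.mpr ⟨by have := hqtl q' hq'; omega, hsub q' (by simp [hq'])⟩
    by_cases h1 : (q - 1) ∈ R ∧ u ≠ some (q - 1)
    · -- both programs lend from q-1
      have hArm : q - 1 ∈ rs := hm1.mpr h1
      have hAlost : pyRemove lc q = lc.erase q := by
        simp [pyRemove, PySem.List.remove?_eq_some_erase lc q hqlc]
      have hAres : pyRemove rs (q - 1) = rs.erase (q - 1) := by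
        simp [pyRemove, PySem.List.remove?_eq_some_erase rs (q - 1) hArm]
      rw [List.foldl_cons, List.foldl_cons]
      rw [show stepA (lc, rs) q = (lc.erase q, rs.erase (q - 1)) by
            simp [stepA, hArm, hAlost, hAres]]
      rw [show stepB R (m, u) q = (m + 1, u) by simp [stepB, h1]]
      have := ih (lc.erase q) (rs.erase (q - 1)) ((q - 1) :: M) u (m + 1) hpwtl
        (fun q' hq' => hdisj q' (by simp [hq'])) hsubtl (hlcnd.erase q) (hrsnd.erase _)
        (by
          intro x
          rw [hrsnd.mem_erase_iff, hchar]
          constructor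
          · rintro ⟨hne, hR, hMm, hux⟩; exact ⟨hR, by simp [hMm, hne], hux⟩
          · rintro ⟨hR, hMm, hux⟩
            simp only [List.mem_cons, not_or] at hMm
            exact ⟨hMm.1, hR, hMm.2, hux⟩)
        (by
          intro y hy q' hq'
          have hqq' := hqtl q' hq'
          rcases List.mem_cons.mp hy with h | h
          · omega
          · exact hM y h q' (by simp [hq']))
        (fun v hv q' hq' => hu v hv q' (by simp [hq']))
      omega
    · by_cases h2 : (q + 1) ∈ R
      · -- both programs lend from q+1
        have hArm : q + 1 ∈ rs := hp1.mpr h2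
        have hAnot : ¬ (q - 1 ∈ rs) := fun h => h1 (hm1.mp h)
        have hAlost : pyRemove lc q = lc.erase q := by
          simp [pyRemove, PySem.List.remove?_eq_some_erase lc q hqlc]
        have hAres : pyRemove rs (q + 1) = rs.erase (q + 1) := by
          simp [pyRemove, PySem.List.remove?_eq_some_erase rs (q + 1) hArm]
        rw [List.foldl_cons, List.foldl_cons]
        rw [show stepA (lc, rs) q = (lc.erase q, rs.erase (q + 1)) by
              simp [stepA, hAnot, hArm, hAlost, hAres]]
        rw [show stepB R (m, u) q = (m + 1, some (q + 1)) by simp [stepB, h1, h2]]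
        have := ih (lc.erase q) (rs.erase (q + 1)) (u.toList ++ M) (some (q + 1)) (m + 1) hpwtl
          (fun q' hq' => hdisj q' (by simp [hq'])) hsubtl (hlcnd.erase q) (hrsnd.erase _)
          (by
            intro x
            rw [hrsnd.mem_erase_iff, hchar]
            cases u with
            | none =>
              simp only [Option.toList, List.nil_append, ne_eq, Option.some.injEq]
              constructor
              · rintro ⟨hne, hR, hMm, _⟩; exact ⟨hR, hMm, by omega⟩
              · rintro ⟨hR, hMm, hne⟩; exact ⟨by omega, hR, hMm, by simp⟩
            | some v =>
              simp only [Option.toList, List.cons_append, List.mem_cons, not_or, ne_eq,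
                Option.some.injEq]
              constructor
              · rintro ⟨hne, hR, hMm, hux⟩
                exact ⟨hR, ⟨fun hxv => hux (by rw [hxv]), hMm⟩, by omega⟩
              · rintro ⟨hR, ⟨hxv, hMm⟩, hne⟩
                exact ⟨by omega, hR, hMm, fun hvx => hxv hvx.symm⟩)
          (by
            intro y hy q' hq'
            have hqq' := hqtl q' hq'
            rcases List.mem_append.mp hy with h | h
            · cases u with
              | none => simp at h
              | some v =>
                simp only [Option.toList, List.mem_singleton] at h
                subst h
                have hvq := hu y rfl q (by simp)
                have : y ≠ q := fun hyq => hdisj q (by simp) (hyq ▸ hvq.2)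
                omega
            · exact hM y h q' (by simp [hq']))
          (by
            rintro v hv q' hq'
            have hqq' := hqtl q' hq'
            cases hv
            exact ⟨by omega, h2⟩)
        omega
      · -- neither program can lend to q
        have hAnot1 : ¬ (q - 1 ∈ rs) := fun h => h1 (hm1.mp h)
        have hAnot2 : ¬ (q + 1 ∈ rs) := fun h => h2 (hp1.mp h)
        rw [List.foldl_cons, List.foldl_cons]
        rw [show stepA (lc, rs) q = (lc, rs) by simp [stepA, hAnot1, hAnot2]]
        rw [show stepB R (m, u) q = (m, u) by simp [stepB, h1, h2]]
        exact ih lc rs M u m hpwtl (fun q' hq' => hdisj q' (by simp [hq']))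
          (fun q' hq' => hsub q' (by simp [hq'])) hlcnd hrsnd hchar
          (fun y hy q' hq' => hM y hy q' (by simp [hq']))
          (fun v hv q' hq' => hu v hv q' (by simp [hq']))

-- ===== VERDICT (by name: the statement is the Claim_ definition above) =====
theorem solution_spec : Claim_equal_solution := by
  intro n lost reserve _
  unfold Spec_solution solution solution_alt
  dsimp only
  -- the two preprocessed lost lists are the same sorted list
  have hdiffnd1 : (PySem.Set.diff (PySem.Set.ofList lost)
      (PySem.Set.inter (PySem.Set.ofList lost) (PySem.Set.ofList reserve))).Nodup :=
    PySem.Set.nodup_diff _ _ (PySem.Set.nodup_ofList lost)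
  have hdiffnd2 : (PySem.Set.diff (PySem.Set.ofList lost) (PySem.Set.ofList reserve)).Nodup :=
    PySem.Set.nodup_diff _ _ (PySem.Set.nodup_ofList lost)
  have hperm : (PySem.Set.diff (PySem.Set.ofList lost)
      (PySem.Set.inter (PySem.Set.ofList lost) (PySem.Set.ofList reserve))).Perm
      (PySem.Set.diff (PySem.Set.ofList lost) (PySem.Set.ofList reserve)) := by
    refine (List.perm_ext_iff_of_nodup hdiffnd1 hdiffnd2).mpr ?_
    intro x
    rw [PySem.Set.mem_diff, PySem.Set.mem_diff, PySem.Set.mem_inter]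
    tauto
  have hLeq : PySem.List.sorted (PySem.Set.diff (PySem.Set.ofList lost)
        (PySem.Set.inter (PySem.Set.ofList lost) (PySem.Set.ofList reserve))) (fun x => x) false
      = PySem.List.sorted (PySem.Set.diff (PySem.Set.ofList lost) (PySem.Set.ofList reserve))
        (fun x => x) false :=
    PySem.List.sorted_eq_sorted_of_perm _ _ _ (fun _ _ h => h) hperm
  rw [hLeq]
  set R : List Int := PySem.Set.diff (PySem.Set.ofList reserve) (PySem.Set.ofList lost) with hR
  set L : List Int := PySem.List.sorted (PySem.Set.diff (PySem.Set.ofList lost)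
      (PySem.Set.ofList reserve)) (fun x => x) false with hL
  have hLnd : L.Nodup := (PySem.List.sorted_perm _ _ _).nodup_iff.mpr hdiffnd2
  have hLpw : L.Pairwise (· < ·) := by
    have hle : L.Pairwise (· ≤ ·) := PySem.List.sorted_pairwise _ _
    exact (hle.and hLnd).imp (fun h => lt_of_le_of_ne h.1 h.2)
  have hLmem : ∀ x, x ∈ L ↔ (x ∈ lost ∧ x ∉ reserve) := by
    intro x
    rw [hL, PySem.List.mem_sorted, PySem.Set.mem_diff, PySem.Set.mem_ofList, PySem.Set.mem_ofList]
  have hdisj : ∀ q ∈ L, q ∉ R := by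
    intro q hq hqR
    rw [hR, PySem.Set.mem_diff, PySem.Set.mem_ofList, PySem.Set.mem_ofList] at hqR
    exact hqR.2 ((hLmem q).mp hq).1
  have hchar : ∀ x : Int, x ∈ PySem.Set.diff (PySem.Set.ofList reserve)
      (PySem.Set.inter (PySem.Set.ofList lost) (PySem.Set.ofList reserve)) ↔
      (x ∈ R ∧ x ∉ ([] : List Int) ∧ (none : Option Int) ≠ some x) := by
    intro x
    rw [hR, PySem.Set.mem_diff, PySem.Set.mem_diff, PySem.Set.mem_inter]
    simp only [List.not_mem_nil, not_false_iff, ne_eq, reduceCtorEq, and_true]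
    tauto
  have hmain := loop_eq R L L
    (PySem.Set.diff (PySem.Set.ofList reserve)
      (PySem.Set.inter (PySem.Set.ofList lost) (PySem.Set.ofList reserve)))
    [] none 0 hLpw hdisj (fun q hq => hq) hLnd
    (PySem.Set.nodup_diff _ _ (PySem.Set.nodup_ofList reserve)) hchar
    (by intro y hy; simp at hy) (by intro v hv; simp at hv)
  omega
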